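-- pv_equiv track=rewrite | github.com/michaeljgallagher/practice | notsmallestsum.py | solution
-- ===== SOURCE A (Python) =====
-- def solution(arr):
--     res = 1
--     for i in range(len(arr)):
--         if res >= arr[i]:
--             res += arr[i]
--         else:
--             break
--     return res
-- ===== SOURCE B (Python) =====
-- def solution(arr):
--     def solve(seg, v):
--         # Run the accumulation over seg starting from running value v.
--         # Returns (final value, True iff no element of seg broke the run).
--         if not seg:
--             return v, True
--         if len(seg) == 1:
--             x = seg[0]
--             return (v + x, True) if v >= x else (v, False)
--         mid = len(seg) // 2
--         r, ok = solve(seg[:mid], v)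
--         if not ok:
--             return r, False
--         return solve(seg[mid:], r)
--     return solve(arr, 1)[0]
-- ===== Notes on version B (the rewrite author's own statement) =====
-- stated objective: alternative
-- what changed: Replaces A's linear left-to-right loop with break by a divide-and-conquer recursion: split the array in half, run the accumulation on the left half returning (value, unbroken-flag), and only if unbroken continue on the right half seeded with the left result.
import Mathlib
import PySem

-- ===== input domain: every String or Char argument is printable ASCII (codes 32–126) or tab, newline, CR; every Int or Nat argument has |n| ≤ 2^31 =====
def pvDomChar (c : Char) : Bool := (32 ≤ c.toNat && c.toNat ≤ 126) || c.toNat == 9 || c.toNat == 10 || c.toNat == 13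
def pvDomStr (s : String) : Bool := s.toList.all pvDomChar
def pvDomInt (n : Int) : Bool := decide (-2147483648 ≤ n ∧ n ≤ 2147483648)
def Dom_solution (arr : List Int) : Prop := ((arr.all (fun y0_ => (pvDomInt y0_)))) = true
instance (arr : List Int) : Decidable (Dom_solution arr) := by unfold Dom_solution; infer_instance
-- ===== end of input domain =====

-- B replaces A's linear loop-with-break by a divide-and-conquer recursion on array halves carrying a (value, unbroken) pair (objective: alternative decomposition).


-- ===== PORT A =====
-- A's loop: res starts at 1; add arr[i] while res ≥ arr[i], break otherwise.
def solutionLoop : List Int → Int → Int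
  | [], res => res
  | a :: t, res => if res ≥ a then solutionLoop t (res + a) else res

def solution (arr : List Int) : Int := solutionLoop arr 1

-- ===== PORT B =====
-- B's divide and conquer: solve(seg, v) runs the accumulation on seg from v,
-- returning (final value, unbroken flag); segments are split at len//2.
def solveAlt (seg : List Int) (v : Int) : Int × Bool :=
  if seg.length = 0 then (v, true)
  else if seg.length = 1 then
    let x := seg.headD 0
    if v ≥ x then (v + x, true) else (v, false)
  else
    let mid := seg.length / 2
    let p := solveAlt (seg.take mid) v
    if p.2 = false then (p.1, false)
    else solveAlt (seg.drop mid) p.1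
termination_by seg.length
decreasing_by
  · simp only [List.length_take]; omega
  · simp only [List.length_drop]; omega

def solution_alt (arr : List Int) : Int := (solveAlt arr 1).1

-- ===== PRECONDITION & SPEC =====
def Spec_solution (arr : List Int) (out : Int) : Prop := out = solution_alt arr
instance (arr : List Int) (out : Int) : Decidable (Spec_solution arr out) := by unfold Spec_solution; infer_instance

-- ===== CLAIM =====
def Claim_equal_solution : Prop := ∀ (arr : List Int), Dom_solution arr → Spec_solution arr (solution arr)

-- ===== LEMMAS AND PROOFS =====
-- Reference pair semantics: A's loop extended with the unbroken flag.
def specPair : List Int → Int → Int × Bool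
  | [], v => (v, true)
  | a :: t, v => if v ≥ a then specPair t (v + a) else (v, false)

theorem solutionLoop_eq_fst (seg : List Int) : ∀ v, solutionLoop seg v = (specPair seg v).1 := by
  induction seg with
  | nil => intro v; rfl
  | cons a t ih =>
    intro v
    simp only [solutionLoop, specPair]
    split_ifs <;> simp [ih]

theorem specPair_append (s t : List Int) : ∀ v,
    specPair (s ++ t) v =
      (if (specPair s v).2 then specPair t (specPair s v).1 else specPair s v) := by
  induction s with
  | nil => intro v; simp [specPair]
  | cons a s' ih =>
    intro v
    by_cases h : v ≥ a
    · simp only [List.cons_append, specPair, if_pos h]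
      exact ih (v + a)
    · simp [specPair, h]

theorem solveAlt_eq (seg : List Int) (v : Int) : solveAlt seg v = specPair seg v := by
  fun_induction solveAlt seg v with
  | case1 seg v h0 =>
    have : seg = [] := List.length_eq_zero_iff.mp h0
    subst this; rfl
  | case2 seg v h0 h1 x hx =>
    obtain ⟨y, hy⟩ := List.length_eq_one_iff.mp h1
    subst hy
    have hx' : v ≥ y := hx
    show ((v + y : Int), true) = _
    simp [specPair, hx']
  | case3 seg v h0 h1 x hx =>
    obtain ⟨y, hy⟩ := List.length_eq_one_iff.mp h1
    subst hy
    have hx' : ¬ v ≥ y := hx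
    simp [specPair, hx']
  | case4 seg v h0 h1 mid p hp ih =>
    have h2 : (solveAlt (List.take mid seg) v).2 = false := hp
    conv_rhs => rw [← List.take_append_drop mid seg]
    rw [specPair_append, ← ih, h2]
    simp only [Bool.false_eq_true, if_false]
    conv_lhs => rw [← hp]
  | case5 seg v h0 h1 mid p hp ih1 ih2 ih3 =>
    have h2 : (solveAlt (List.take mid seg) v).2 = true := by
      cases hb : p.2
      · exact absurd hb hp
      · rfl
    conv_rhs => rw [← List.take_append_drop mid seg]
    rw [specPair_append, ← ih1, h2, if_pos rfl]
    exact ih3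

-- ===== VERDICT =====
theorem solution_spec : Claim_equal_solution := by
  intro arr _
  unfold Spec_solution solution solution_alt
  rw [solveAlt_eq, solutionLoop_eq_fst]
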